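-- pv_equiv track=rewrite | github.com/goodnessm3/snekbot | clean_text.py | discordRemoveUnescapedFormatting
-- ===== SOURCE A (Python) =====
-- discordFormatChars = [
--     "`",
--     "*",
--     "_",
--     "|"
-- ]
--
-- def discordRemoveUnescapedFormatting(str):
--     reslist = list(str)
--     i = 0
--     while i < len(reslist):
--         if reslist[i] in discordFormatChars:
--             if i == 0 or reslist[i-1] != '\\':
--                 del reslist[i]
--                 i -= 1
--
--         i += 1
--     return "".join(reslist)
-- ===== SOURCE B (Python) =====
-- discordFormatChars = [
--     "`",
--     "*",
--     "_",
--     "|"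
-- ]
--
-- def discordRemoveUnescapedFormatting(str):
--     res = []
--     prev = None
--     for c in str:
--         if c not in discordFormatChars or prev == '\\':
--             res.append(c)
--         prev = c
--     return "".join(res)
-- ===== Notes on version B (the rewrite author's own statement) =====
-- stated objective: simpler
-- what changed: Replaces A's in-place deletion loop with index backtracking and lookback into the mutated list by a single pure pass that keeps a character unless it is a formatting character whose ORIGINAL predecessor is not a backslash (backslashes are never deleted, so the preceding kept char is a backslash iff the preceding original char is).
import Mathlib
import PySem

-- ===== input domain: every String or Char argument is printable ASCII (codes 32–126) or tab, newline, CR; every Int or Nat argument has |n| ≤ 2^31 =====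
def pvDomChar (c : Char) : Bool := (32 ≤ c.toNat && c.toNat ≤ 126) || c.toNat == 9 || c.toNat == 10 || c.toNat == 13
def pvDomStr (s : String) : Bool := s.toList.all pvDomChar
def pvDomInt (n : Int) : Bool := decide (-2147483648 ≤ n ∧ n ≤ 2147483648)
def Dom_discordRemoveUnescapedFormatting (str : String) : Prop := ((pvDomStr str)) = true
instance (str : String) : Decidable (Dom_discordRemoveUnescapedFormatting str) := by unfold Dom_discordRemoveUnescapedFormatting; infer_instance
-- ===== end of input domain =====

-- B replaces A's in-place deletion loop (which looks back into the mutated list) by one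
-- pure pass keeping a char unless it is an unescaped formatting char (objective: simpler).

-- ===== PORT A =====
def discordFormatChars : List Char := ['`', '*', '_', '|']

-- the while-loop of A: state (reslist, i); `del reslist[i]; i -= 1` followed by `i += 1`
-- leaves i unchanged, so the two nested ifs become one conjunction.
def pvALoop (reslist : List Char) (i : Nat) : List Char :=
  if h : i < reslist.length then
    if reslist[i] ∈ discordFormatChars ∧ (i = 0 ∨ reslist[i-1]? ≠ some '\\') then
      pvALoop (reslist.eraseIdx i) i
    else
      pvALoop reslist (i + 1)
  else reslist
termination_by reslist.length - i
decreasing_by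
  · simp [List.length_eraseIdx, h]; omega
  · omega

def discordRemoveUnescapedFormatting (str : String) : String :=
  String.mk (pvALoop str.toList 0)

-- ===== PORT B =====
-- B's for-loop state: (res, prev)
def pvBStep (st : List Char × Option Char) (c : Char) : List Char × Option Char :=
  (if c ∉ discordFormatChars ∨ st.2 = some '\\' then st.1 ++ [c] else st.1, some c)

def discordRemoveUnescapedFormatting_alt (str : String) : String :=
  String.mk (str.toList.foldl pvBStep ([], none)).1

-- ===== PRECONDITION & SPEC =====
def Spec_discordRemoveUnescapedFormatting (str : String) (out : String) : Prop := out = discordRemoveUnescapedFormatting_alt str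
instance (str : String) (out : String) : Decidable (Spec_discordRemoveUnescapedFormatting str out) := by unfold Spec_discordRemoveUnescapedFormatting; infer_instance

-- ===== CLAIM (what is proved, stated in full; the proofs are below) =====
def Claim_equal_discordRemoveUnescapedFormatting : Prop := ∀ (str : String), Dom_discordRemoveUnescapedFormatting str → Spec_discordRemoveUnescapedFormatting str (discordRemoveUnescapedFormatting str)

-- ===== LEMMAS AND PROOFS =====

lemma pv_eraseIdx_append (done : List Char) (c : Char) (rest : List Char) :
    (done ++ c :: rest).eraseIdx done.length = done ++ rest := by
  induction done with
  | nil => rfl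
  | cons d ds ih => simp [List.eraseIdx, ih]

-- invariant: A's state is (kept ++ remaining, kept.length) with kept = B's res; the last kept
-- char is a backslash iff B's prev is, since backslashes are never deleted and a deleted char
-- is a formatting char whose own predecessor was not a backslash.
lemma pv_loop_eq (rest done : List Char) (p : Option Char)
    (hp : (done.getLast? = some '\\') ↔ (p = some '\\')) :
    pvALoop (done ++ rest) done.length = (rest.foldl pvBStep (done, p)).1 := by
  induction rest generalizing done p with
  | nil =>
    rw [pvALoop]
    simp
  | cons c rest ih =>
    have hidx : (done ++ c :: rest)[done.length]'(by simp) = c := by simp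
    have hprev : done ≠ [] → (done ++ c :: rest)[done.length - 1]? = done.getLast? := by
      intro hne
      have hlt : done.length - 1 < done.length := by
        have := List.length_pos_of_ne_nil hne; omega
      rw [List.getElem?_append_left hlt, List.getLast?_eq_getElem?]
    rw [pvALoop]
    simp only [List.foldl_cons]
    by_cases hc : c ∈ discordFormatChars
    case pos =>
      by_cases hbs : p = some '\\'
      case pos =>
        -- escaped formatting char: both keep it
        have hdl : done.getLast? = some '\\' := hp.mpr hbs
        have hne : done ≠ [] := by intro h; simp [h] at hdl
        have hcond : ¬(c ∈ discordFormatChars ∧ (done.length = 0 ∨ (done ++ c :: rest)[done.length - 1]? ≠ some '\\')) := by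
          rw [hprev hne]
          rintro ⟨-, h0 | hne'⟩
          · exact hne (List.length_eq_zero_iff.mp h0)
          · exact hne' hdl
        rw [dif_pos (by simp), hidx, if_neg hcond]
        have heq : done ++ c :: rest = (done ++ [c]) ++ rest := by simp
        rw [heq, show done.length + 1 = (done ++ [c]).length by simp]
        rw [ih (done ++ [c]) (some c) (by simp)]
        simp [pvBStep, hc, hbs]
      case neg =>
        -- unescaped formatting char: both drop it
        have hdl : done.getLast? ≠ some '\\' := fun h => hbs (hp.mp h)
        have hcbs : c ≠ '\\' := by rintro rfl; exact absurd hc (by decide)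
        have hcond : c ∈ discordFormatChars ∧ (done.length = 0 ∨ (done ++ c :: rest)[done.length - 1]? ≠ some '\\') := by
          refine ⟨hc, ?_⟩
          by_cases hne : done = []
          · left; simp [hne]
          · right; rw [hprev hne]; exact hdl
        rw [dif_pos (by simp), hidx, if_pos hcond, pv_eraseIdx_append]
        have hiff : (done.getLast? = some '\\') ↔ ((some c : Option Char) = some '\\') := by
          constructor
          · intro h; exact absurd h hdl
          · intro h; exact absurd (Option.some_injective _ h) hcbs
        rw [ih done (some c) hiff]
        simp [pvBStep, hc, hbs]
    case neg =>
      -- not a formatting char: both keep it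
      have hcond : ¬(c ∈ discordFormatChars ∧ (done.length = 0 ∨ (done ++ c :: rest)[done.length - 1]? ≠ some '\\')) := by
        simp [hc]
      rw [dif_pos (by simp), hidx, if_neg hcond]
      have heq : done ++ c :: rest = (done ++ [c]) ++ rest := by simp
      rw [heq, show done.length + 1 = (done ++ [c]).length by simp]
      rw [ih (done ++ [c]) (some c) (by simp)]
      simp [pvBStep, hc]

-- ===== VERDICT (by name: the statement is the Claim_ definition above) =====
theorem discordRemoveUnescapedFormatting_spec : Claim_equal_discordRemoveUnescapedFormatting := by
  intro s _
  unfold Spec_discordRemoveUnescapedFormatting discordRemoveUnescapedFormatting discordRemoveUnescapedFormatting_alt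
  exact congrArg String.mk (by simpa using pv_loop_eq s.toList [] none (by simp))
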